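-- pv_equiv track=rewrite | github.com/carnarez/astdocs | cookbook/object_graph.py | is_local
-- ===== SOURCE A (Python) =====
-- import typing
--
-- def is_local(p: str, objects: typing.List[str]) -> bool:
--     """Check whether an object is local, or external, looking at its path.
--
--     Parameters
--     ----------
--     p : str
--         String representation of the object path.
--     objects : typing.List[str]
--         List of local objects to check for.
--
--     Returns
--     -------
--     : bool
--         Whether the object is local or external to the `Python` parsed package(s).
--     """
--     if p in objects:
--         return True
--
--     if not p.endswith("."):
--         p += "."
--
--     for o in objects:
--         if p.startswith(f"{o}."):
--             return True
--         for m in o.split("."):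
--             if p.startswith(f"{m}."):
--                 return True
--
--     return False
-- ===== SOURCE B (Python) =====
-- def is_local(p, objects):
--     if p in objects:
--         return True
--     q = p if p.endswith(".") else p + "."
--     head = q[:q.index(".")]
--     if head in {s for o in objects for s in o.split(".")}:
--         return True
--     obj_set = set(objects)
--     for i, ch in enumerate(q):
--         if ch == "." and q[:i] in obj_set:
--             return True
--     return False
-- ===== Notes on version B (the rewrite author's own statement) =====
-- stated objective: alternative
-- what changed: Instead of scanning every object (and every dotted segment of every object) with startswith, B checks p's leading dot-free run against a precomputed set of all object segments and then makes one character scan over p, testing the prefix before each dot for membership in a hash set of the objects.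
import Mathlib
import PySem

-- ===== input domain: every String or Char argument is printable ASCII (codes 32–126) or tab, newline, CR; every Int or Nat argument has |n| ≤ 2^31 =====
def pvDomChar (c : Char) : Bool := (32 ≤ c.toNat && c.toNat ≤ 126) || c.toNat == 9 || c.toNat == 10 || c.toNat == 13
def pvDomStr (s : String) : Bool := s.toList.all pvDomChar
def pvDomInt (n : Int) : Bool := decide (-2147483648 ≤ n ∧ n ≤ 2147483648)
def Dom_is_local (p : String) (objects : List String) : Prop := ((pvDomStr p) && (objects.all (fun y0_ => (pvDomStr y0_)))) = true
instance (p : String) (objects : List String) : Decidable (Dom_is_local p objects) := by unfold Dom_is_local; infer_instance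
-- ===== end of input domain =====

-- B replaces A's scan of `objects` (startswith against every object and against every
-- dotted segment of every object) by precomputed sets and ONE character scan over p:
-- p's leading dot-free run is looked up in the set of all object segments, and the
-- prefix before each dot of p in a hash set of the objects (return value identical).
-- String code is ported on the List Char side (PySem.Chars), with thin String wrappers.

-- ===== PORT A =====
-- A, core on char lists: `for o in objects: if ... return True` is `List.any`.
def isLocalACore (p : List Char) (objects : List (List Char)) : Bool :=
  if objects.contains p then true
  else
    let q := if PySem.Chars.endswith p ['.'] then p else p ++ ['.']
    objects.any (fun o =>
      PySem.Chars.startswith q (o ++ ['.']) ||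
      (PySem.Chars.splitOn o ['.']).any (fun m => PySem.Chars.startswith q (m ++ ['.'])))

def is_local (p : String) (objects : List String) : Bool :=
  isLocalACore p.toList (objects.map String.toList)

-- ===== PORT B =====
-- B, core on char lists (Source B line by line). q always contains '.', so Source B's
-- `q[:q.index(".")]` — the run of characters before the first dot — is `takeWhile (· ≠ '.')`
-- (exact here since '.' ∈ q); `for i, ch in enumerate(q)` is PySem.List.enumerate;
-- `q[:i]` is the slice primitive.
def isLocalBCore (p : List Char) (objects : List (List Char)) : Bool :=
  if objects.contains p then true
  else
    let q := if PySem.Chars.endswith p ['.'] then p else p ++ ['.']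
    let head := q.takeWhile (fun c => c ≠ '.')
    let segSet := PySem.Set.ofList (objects.flatMap (fun o => PySem.Chars.splitOn o ['.']))
    if segSet.contains head then true
    else
      let objSet := PySem.Set.ofList objects
      (PySem.List.enumerate q).any (fun ic =>
        ic.2 == '.' && objSet.contains (PySem.List.slice q none (some ic.1)))

def is_local_alt (p : String) (objects : List String) : Bool :=
  isLocalBCore p.toList (objects.map String.toList)

-- ===== PRECONDITION & SPEC =====
def Spec_is_local (p : String) (objects : List String) (out : Bool) : Prop := out = is_local_alt p objects
instance (p : String) (objects : List String) (out : Bool) : Decidable (Spec_is_local p objects out) := by unfold Spec_is_local; infer_instance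

-- ===== CLAIM (what is proved, stated in full; the proofs are below) =====
def Claim_equal_is_local : Prop := ∀ (p : String) (objects : List String), Dom_is_local p objects → Spec_is_local p objects (is_local p objects)

-- ===== LEMMAS AND PROOFS =====

-- Reference single-char split (plain structural recursion, used only in proofs).
def sp : List Char → List (List Char)
  | [] => [[]]
  | c :: rest => if c = '.' then [] :: sp rest else (sp rest).modifyHead (c :: ·)

lemma sp_ne_nil (l : List Char) : sp l ≠ [] := by
  induction l with
  | nil => simp [sp]
  | cons c rest ih =>
    simp only [sp]
    split
    · simp
    · cases h : sp rest with
      | nil => exact absurd h ih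
      | cons a t => simp [List.modifyHead]

lemma sp_cons_dot (rest : List Char) : sp ('.' :: rest) = [] :: sp rest := by simp [sp]

lemma sp_cons_ne (c : Char) (rest : List Char) (hc : c ≠ '.') :
    sp (c :: rest) = (sp rest).modifyHead (c :: ·) := by simp [sp, hc]

lemma sp_no_dot (l : List Char) : ∀ s ∈ sp l, '.' ∉ s := by
  induction l with
  | nil => simp [sp]
  | cons c rest ih =>
    by_cases hc : c = '.'
    · subst hc; rw [sp_cons_dot]
      intro s hs
      rcases List.mem_cons.mp hs with hs | hs
      · simp [hs]
      · exact ih s hs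
    · rw [sp_cons_ne c rest hc]
      rcases hn : sp rest with _ | ⟨h, t⟩
      · exact absurd hn (sp_ne_nil rest)
      · rw [hn] at ih
        intro s hs
        rcases List.mem_cons.mp hs with hs | hs
        · subst hs
          intro hmem
          rcases List.mem_cons.mp hmem with hmem | hmem
          · exact hc hmem.symm
          · exact ih h (by simp) hmem
        · exact ih s (by simp [hs])

-- PySem.Chars.splitOn with a single-char separator computes `sp`.
lemma splitOn_go_single (fuel : Nat) : ∀ (l cur : List Char) (acc : List (List Char))
    (h : List Char) (t : List (List Char)), l.length ≤ fuel → sp l = h :: t →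
    PySem.Chars.splitOn.go ['.'] fuel l cur acc = acc.reverse ++ (cur.reverse ++ h) :: t := by
  induction fuel with
  | zero =>
    intro l cur acc h t hle hsp
    have hl : l = [] := List.eq_nil_of_length_eq_zero (Nat.le_zero.mp hle)
    subst hl
    simp only [sp] at hsp
    injection hsp with h1 h2
    subst h1; subst h2
    simp [PySem.Chars.splitOn.go]
  | succ fuel ih =>
    intro l cur acc h t hle hsp
    cases l with
    | nil =>
      simp only [sp] at hsp
      injection hsp with h1 h2
      subst h1; subst h2
      simp [PySem.Chars.splitOn.go]
    | cons c rest =>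
      by_cases hc : c = '.'
      · subst hc
        rw [sp_cons_dot] at hsp
        rcases hn : sp rest with _ | ⟨h', t'⟩
        · exact absurd hn (sp_ne_nil rest)
        · rw [hn] at hsp
          injection hsp with hh ht
          have := ih rest [] (cur.reverse :: acc) h' t' (by simpa using Nat.le_of_succ_le_succ hle) hn
          simp [PySem.Chars.splitOn.go, List.isPrefixOf] at this ⊢
          rw [this, ← hh, ← ht]
          simp
      · rw [sp_cons_ne c rest hc] at hsp
        rcases hn : sp rest with _ | ⟨h', t'⟩
        · exact absurd hn (sp_ne_nil rest)
        · rw [hn] at hsp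
          simp [List.modifyHead] at hsp
          have := ih rest (c :: cur) acc h' t' (by simpa using Nat.le_of_succ_le_succ hle) hn
          simp [PySem.Chars.splitOn.go, List.isPrefixOf, Ne.symm hc] at this ⊢
          rw [this, ← hsp.1, ← hsp.2]

lemma splitOn_eq_sp (s : List Char) : PySem.Chars.splitOn s ['.'] = sp s := by
  rcases hn : sp s with _ | ⟨h, t⟩
  · exact absurd hn (sp_ne_nil s)
  · have := splitOn_go_single (s.length + 1) s [] [] h t (Nat.le_succ _) hn
    simpa [PySem.Chars.splitOn] using this

lemma pref_split (s o T : List Char) (hs : '.' ∉ s) :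
    ((o ++ ['.']) <+: (s ++ '.' :: T)) ↔
      (o = s ∨ ∃ o', o = s ++ '.' :: o' ∧ (o' ++ ['.']) <+: T) := by
  constructor
  · intro hpre
    rcases lt_trichotomy o.length s.length with hlt | heq | hgt
    · exfalso
      have h1 : (o ++ ['.']) <+: s :=
        List.prefix_of_prefix_length_le hpre (List.prefix_append s ('.' :: T)) (by simp; omega)
      exact hs (h1.subset (by simp))
    · left
      have h1 : o <+: (s ++ '.' :: T) := ((o.prefix_append ['.']).trans hpre)
      have h2 : o <+: s :=
        List.prefix_of_prefix_length_le h1 (List.prefix_append s ('.' :: T)) (by omega)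
      exact h2.eq_of_length heq
    · right
      have hb : (s ++ ['.']) <+: (s ++ '.' :: T) := by
        rw [List.prefix_append_right_inj]
        exact ⟨T, rfl⟩
      have h1 : (s ++ ['.']) <+: (o ++ ['.']) :=
        List.prefix_of_prefix_length_le hb hpre (by simp; omega)
      have h2 : (s ++ ['.']) <+: o :=
        List.prefix_of_prefix_length_le h1 (o.prefix_append ['.']) (by simp; omega)
      obtain ⟨o', rfl⟩ := h2
      refine ⟨o', by simp, ?_⟩
      have : s ++ '.' :: (o' ++ ['.']) <+: s ++ '.' :: T := by simpa using hpre
      rw [List.prefix_append_right_inj, List.cons_prefix_cons] at this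
      exact this.2
  · intro h
    rcases h with rfl | ⟨o', rfl, hp⟩
    · simp
    · have : s ++ ('.' :: (o' ++ ['.'])) <+: s ++ ('.' :: T) := by
        rw [List.prefix_append_right_inj, List.cons_prefix_cons]
        exact ⟨rfl, hp⟩
      simpa using this

-- A prefix of q closed by a dot is exactly "q up to some dot position".
lemma pref_dot_iff (o q : List Char) :
    (o ++ ['.']) <+: q ↔ ∃ i : Nat, i < q.length ∧ q[i]? = some '.' ∧ q.take i = o := by
  constructor
  · intro hpre
    have hlen : o.length + 1 ≤ q.length := by have := hpre.length_le; simpa using this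
    have heq : q.take (o.length + 1) = o ++ ['.'] := by
      have := (List.prefix_iff_eq_take.mp hpre)
      simpa using this.symm
    refine ⟨o.length, by omega, ?_, ?_⟩
    · have h1 : q[o.length]? = (q.take (o.length + 1))[o.length]? := by
        rw [List.getElem?_take_of_lt (by omega)]
      rw [h1, heq]
      simp
    · have : (q.take (o.length + 1)).take o.length = o := by
        rw [heq]; simp
      simpa [List.take_take] using this
  · rintro ⟨i, hi, hget, htake⟩
    have : q.take (i + 1) = o ++ ['.'] := by
      rw [List.take_add_one, htake, hget]
      rfl
    rw [← this]
    exact List.take_prefix _ _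

-- For a dot-free m, m ++ "." is a prefix of q (which contains a dot) iff m is
-- q's leading dot-free run.
lemma head_dot_iff (m q : List Char) (hm : '.' ∉ m) (hq : ('.' : Char) ∈ q) :
    ((m ++ ['.']) <+: q) ↔ m = q.takeWhile (fun c => c ≠ '.') := by
  have hnd : ('.' : Char) ∉ q.takeWhile (fun c => c ≠ '.') := by
    intro h
    have := List.mem_takeWhile_imp h
    simp at this
  have hdw : q.dropWhile (fun c => c ≠ '.') ≠ [] := by
    intro h0
    have : q.takeWhile (fun c => c ≠ '.') = q := by
      have := List.takeWhile_append_dropWhile (p := fun c => c ≠ '.') (l := q)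
      rw [h0] at this; simpa using this
    rw [this] at hnd
    exact hnd hq
  rcases hD : q.dropWhile (fun c => c ≠ '.') with _ | ⟨d, rest⟩
  · exact absurd hD hdw
  · have hd : d = '.' := by
      have h2 := List.head_dropWhile_not (p := fun c => c ≠ '.') (l := q) hdw
      have h3 : (q.dropWhile (fun c => c ≠ '.')).head? = some d := by rw [hD]; rfl
      rw [List.head?_eq_some_head hdw] at h3
      rw [Option.some.inj h3] at h2
      simpa using h2
    subst hd
    have hdecomp : q = q.takeWhile (fun c => c ≠ '.') ++ '.' :: rest := by
      conv_lhs => rw [← List.takeWhile_append_dropWhile (p := fun c => c ≠ '.') (l := q)]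
      rw [hD]
    have key := pref_split (q.takeWhile (fun c => c ≠ '.')) m rest hnd
    constructor
    · intro h
      rw [hdecomp] at h
      rcases key.mp h with h | ⟨o', rfl, _⟩
      · exact h
      · exact absurd (List.mem_append_right _ (by simp)) hm
    · intro h
      rw [hdecomp]
      exact key.mpr (Or.inl h)

lemma core_eq (p : List Char) (objects : List (List Char)) :
    isLocalACore p objects = isLocalBCore p objects := by
  unfold isLocalACore isLocalBCore
  by_cases hc : objects.contains p = true
  · have hp : p ∈ objects := by simpa using hc
    simp [hp]
  · simp only [hc, Bool.false_eq_true, if_false]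
    set q := if PySem.Chars.endswith p ['.'] then p else p ++ ['.'] with hqdef
    have hmem : ('.' : Char) ∈ q := by
      rw [hqdef]
      by_cases he : PySem.Chars.endswith p ['.'] = true
      · simp only [he, if_true]
        exact ((PySem.Chars.endswith_iff _ _).mp he).sublist.subset (by simp)
      · simp [he]
    rw [Bool.eq_iff_iff]
    simp only [List.any_eq_true, Bool.or_eq_true]
    constructor
    · rintro ⟨o, ho, hcase⟩
      rcases hcase with hcase | hcase
      · -- outer startswith → B's character scan finds the dot closing the prefix o
        have hpre := (PySem.Chars.startswith_iff _ _).mp (by simpa using hcase)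
        obtain ⟨i, hi, hget, htake⟩ := (pref_dot_iff o q).mp hpre
        split
        · rfl
        · refine List.any_eq_true.mpr ⟨((i : Int), '.'), ?_, ?_⟩
          · rw [PySem.List.mem_enumerate_iff]
            refine ⟨i, hi, ?_⟩
            have : q[i] = '.' := by
              have := List.getElem?_eq_getElem (l := q) (i := i) hi
              rw [hget] at this
              exact (Option.some.injEq _ _ ▸ this.symm)
            simp [this]
          · simp only [beq_self_eq_true, Bool.true_and]
            rw [PySem.List.slice_to _ (by positivity), PySem.Set.contains_iff,
              PySem.Set.mem_ofList]
            simpa [htake] using ho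
      · -- inner loop: a dot-free segment m matches iff it is q's leading run
        obtain ⟨m, hmo, hpre⟩ := hcase
        rw [splitOn_eq_sp] at hmo
        have hmnd : ('.' : Char) ∉ m := sp_no_dot o m hmo
        have hpre' := (PySem.Chars.startswith_iff _ _).mp (by simpa using hpre)
        have hmh := (head_dot_iff m q hmnd hmem).mp hpre'
        rw [if_pos]
        rw [PySem.Set.contains_iff, PySem.Set.mem_ofList]
        exact List.mem_flatMap.mpr ⟨o, ho, by rw [splitOn_eq_sp]; exact hmh ▸ hmo⟩
    · intro hrhs
      split at hrhs
      · -- head in segSet → the corresponding object's inner loop fires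
        rename_i hset
        rw [PySem.Set.contains_iff, PySem.Set.mem_ofList] at hset
        obtain ⟨o, ho, hmo⟩ := List.mem_flatMap.mp hset
        rw [splitOn_eq_sp] at hmo
        have hmnd : ('.' : Char) ∉ _ := sp_no_dot o _ hmo
        refine ⟨o, ho, Or.inr ⟨_, by rw [splitOn_eq_sp]; exact hmo,
          (PySem.Chars.startswith_iff _ _).mpr ?_⟩⟩
        exact (head_dot_iff _ q hmnd hmem).mpr rfl
      · -- character scan found a dot whose preceding prefix is an object
        obtain ⟨ic, hic, hcond⟩ := List.any_eq_true.mp hrhs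
        rw [PySem.List.mem_enumerate_iff] at hic
        obtain ⟨k, hk, rfl⟩ := hic
        simp only [Bool.and_eq_true, beq_iff_eq] at hcond
        obtain ⟨hdot, hobj⟩ := hcond
        rw [PySem.List.slice_to _ (by positivity), PySem.Set.contains_iff,
          PySem.Set.mem_ofList] at hobj
        refine ⟨_, by simpa using hobj, Or.inl ?_⟩
        refine (PySem.Chars.startswith_iff _ _).mpr ?_
        refine (pref_dot_iff _ q).mpr ⟨k, hk, ?_, by simp⟩
        simpa [List.getElem?_eq_getElem hk] using congrArg some hdot

-- ===== VERDICT (by name: the statement is the Claim_ definition above) =====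
theorem is_local_spec : Claim_equal_is_local := by
  intro p objects _
  unfold Spec_is_local is_local is_local_alt
  exact core_eq p.toList (objects.map String.toList)
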